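-- pv_equiv track=rewrite | github.com/jrahman-zz/LLNL-DCSL-PerformancePrediction | modelling/run_experiment.py | process_value
-- ===== SOURCE A (Python) =====
-- def process_value(x):
--     apps = x[0].split('.')
--     output = []
--     for i in range(len(apps)):
--         first_app = apps[i]
--         remaining_apps = '.'.join(apps[0:i] + apps[i+1:])
--         output.append((first_app, remaining_apps, x[1]))
--     return output
-- ===== SOURCE B (Python) =====
-- def process_value(x):
--     apps = x[0].split('.')
--     n = len(apps)
--     # suff[i] = '.'.join(apps[i+1:]), built once right-to-left
--     suff = [''] * n
--     for i in range(n - 2, -1, -1):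
--         suff[i] = apps[i + 1] if i == n - 2 else apps[i + 1] + '.' + suff[i + 1]
--     out = []
--     pref = ''  # '.'.join(apps[:i]), maintained left-to-right
--     for i in range(n):
--         if i == 0:
--             rem = suff[0]
--         elif i == n - 1:
--             rem = pref
--         else:
--             rem = pref + '.' + suff[i]
--         out.append((apps[i], rem, x[1]))
--         pref = apps[i] if i == 0 else pref + '.' + apps[i]
--     return out
-- ===== Notes on version B (the rewrite author's own statement) =====
-- stated objective: alternative
-- what changed: A re-joins the two full slices apps[:i]+apps[i+1:] from scratch inside the loop; B precomputes suffix joins in one backward pass and maintains the prefix join incrementally, stitching prefix and suffix per index.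
import Mathlib
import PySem

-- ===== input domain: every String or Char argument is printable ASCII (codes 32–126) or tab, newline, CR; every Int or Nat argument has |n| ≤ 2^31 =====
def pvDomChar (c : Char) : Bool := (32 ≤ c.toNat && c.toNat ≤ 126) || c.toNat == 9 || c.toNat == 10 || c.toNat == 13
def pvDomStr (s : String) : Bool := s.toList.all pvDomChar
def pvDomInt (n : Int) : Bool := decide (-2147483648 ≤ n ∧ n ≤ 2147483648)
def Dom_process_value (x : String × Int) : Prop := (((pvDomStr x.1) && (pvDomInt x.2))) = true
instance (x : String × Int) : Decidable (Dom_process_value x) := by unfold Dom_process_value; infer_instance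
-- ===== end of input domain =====

-- B changes the decomposition: one backward pass precomputing suffix joins plus an
-- incrementally maintained prefix join replace A's per-index re-join of both slices.

-- ===== PORT A =====
-- for i in range(len(apps)): output.append((apps[i], '.'.join(apps[0:i]+apps[i+1:]), x[1]))
def process_value (x : String × Int) : List (String × String × Int) :=
  let apps := PySem.Chars.splitOn x.1.toList ['.']
  (PySem.List.pyRange 0 (apps.length : Int) 1).foldl (fun output i =>
    let first_app := (PySem.List.pyGet? apps i).getD []
    let remaining_apps := PySem.Chars.join ['.']
      (PySem.List.slice apps (some 0) (some i) ++ PySem.List.slice apps (some (i + 1)) none)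
    output ++ [(String.ofList first_app, String.ofList remaining_apps, x.2)]) []

-- ===== PORT B =====
-- backward pass of Source B: suff[i] = apps[i+1] if i == n-2 else apps[i+1] + '.' + suff[i+1]
def pvSuff : List (List Char) → List (List Char)
  | [] => []
  | [_] => [[]]
  | _ :: b :: rest =>
      let s := pvSuff (b :: rest)
      (if rest.isEmpty then b else b ++ '.' :: s.headD []) :: s

-- forward pass of Source B: stitch pref / suff[i] by position, maintain pref incrementally
def pvLoopB (v : Int) : List (List Char) → List (List Char) → List Char → Bool →
    List (String × String × Int)
  | [], _, _, _ => []
  | _ :: _, [], _, _ => []   -- unreachable: suff has the same length as apps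
  | a :: rest, s :: srest, pref, first =>
      let rem := if first then s else if rest.isEmpty then pref else pref ++ '.' :: s
      (String.ofList a, String.ofList rem, v) ::
        pvLoopB v rest srest (if first then a else pref ++ '.' :: a) false

def process_value_alt (x : String × Int) : List (String × String × Int) :=
  let apps := PySem.Chars.splitOn x.1.toList ['.']
  pvLoopB x.2 apps (pvSuff apps) [] true

-- ===== PRECONDITION & SPEC =====
def Spec_process_value (x : String × Int) (out : List (String × String × Int)) : Prop := out = process_value_alt x
instance (x : String × Int) (out : List (String × String × Int)) : Decidable (Spec_process_value x out) := by unfold Spec_process_value; infer_instance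

-- ===== CLAIM (what is proved, stated in full; the proofs are below) =====
def Claim_equal_process_value : Prop := ∀ (x : String × Int), Dom_process_value x → Spec_process_value x (process_value x)

-- ===== LEMMAS AND PROOFS =====

-- reference form both ports are reduced to
def pvSpec (v : Int) : List (List Char) → List (List Char) → List (String × String × Int)
  | _, [] => []
  | pre, a :: rest =>
      (String.ofList a, String.ofList (PySem.Chars.join ['.'] (pre ++ rest)), v) ::
        pvSpec v (pre ++ [a]) rest

theorem pvJoin_append (sep : List Char) (p q : List (List Char)) (hp : p ≠ []) (hq : q ≠ []) :
    PySem.Chars.join sep (p ++ q) = PySem.Chars.join sep p ++ sep ++ PySem.Chars.join sep q := by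
  induction p with
  | nil => exact absurd rfl hp
  | cons x p' ih =>
    cases p' with
    | nil =>
      cases q with
      | nil => exact absurd rfl hq
      | cons y q' =>
        simp [PySem.Chars.join_cons_cons, PySem.Chars.join_singleton]
    | cons z p'' =>
      have ih' := ih (by simp)
      simp only [List.cons_append] at ih' ⊢
      rw [PySem.Chars.join_cons_cons, ih', PySem.Chars.join_cons_cons]
      simp [List.append_assoc]

theorem pvSuff_cons (a : List Char) (t : List (List Char)) :
    pvSuff (a :: t) = PySem.Chars.join ['.'] t :: pvSuff t := by
  induction t generalizing a with
  | nil => simp [pvSuff, PySem.Chars.join_nil]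
  | cons b rest ih =>
    show (if rest.isEmpty then b else b ++ '.' :: (pvSuff (b :: rest)).headD []) :: pvSuff (b :: rest)
        = PySem.Chars.join ['.'] (b :: rest) :: pvSuff (b :: rest)
    rw [ih b]
    cases rest with
    | nil => simp [PySem.Chars.join_singleton, PySem.Chars.join_nil]
    | cons c rest' =>
      simp [PySem.Chars.join_cons_cons]

theorem pvLoopB_eq_spec (v : Int) (apps pre : List (List Char)) :
    pvLoopB v apps (pvSuff apps) (PySem.Chars.join ['.'] pre) pre.isEmpty = pvSpec v pre apps := by
  induction apps generalizing pre with
  | nil => cases pre <;> rfl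
  | cons a rest ih =>
    rw [pvSuff_cons]
    show (String.ofList a, String.ofList (if pre.isEmpty then PySem.Chars.join ['.'] rest
        else if rest.isEmpty then PySem.Chars.join ['.'] pre
        else PySem.Chars.join ['.'] pre ++ '.' :: PySem.Chars.join ['.'] rest), v) ::
      pvLoopB v rest (pvSuff rest)
        (if pre.isEmpty then a else PySem.Chars.join ['.'] pre ++ '.' :: a) false = pvSpec v pre (a :: rest)
    have hpref : (if pre.isEmpty then a else PySem.Chars.join ['.'] pre ++ '.' :: a)
        = PySem.Chars.join ['.'] (pre ++ [a]) := by
      cases pre with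
      | nil => simp [PySem.Chars.join_singleton]
      | cons p ps =>
        rw [if_neg (by simp), pvJoin_append ['.'] (p :: ps) [a] (by simp) (by simp),
          PySem.Chars.join_singleton]
        simp
    have hrem : (if pre.isEmpty then PySem.Chars.join ['.'] rest
        else if rest.isEmpty then PySem.Chars.join ['.'] pre
        else PySem.Chars.join ['.'] pre ++ '.' :: PySem.Chars.join ['.'] rest)
        = PySem.Chars.join ['.'] (pre ++ rest) := by
      cases pre with
      | nil => simp
      | cons p ps =>
        cases rest with
        | nil => simp
        | cons r rs =>
          rw [pvJoin_append ['.'] (p :: ps) (r :: rs) (by simp) (by simp)]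
          simp
    rw [hrem, hpref]
    have hfalse : (false : Bool) = (pre ++ [a]).isEmpty := by simp
    rw [hfalse, ih (pre ++ [a])]
    rfl

theorem pvMap_range_eq_spec (v : Int) (apps pre : List (List Char)) :
    (List.range apps.length).map (fun i =>
        (String.ofList (apps.getD i []),
         String.ofList (PySem.Chars.join ['.'] (pre ++ (apps.take i ++ apps.drop (i + 1)))), v))
      = pvSpec v pre apps := by
  induction apps generalizing pre with
  | nil => rfl
  | cons a rest ih =>
    simp only [List.length_cons]
    rw [List.range_succ_eq_map, List.map_cons, List.map_map]
    show (String.ofList a, String.ofList (PySem.Chars.join ['.'] (pre ++ rest)), v) :: _ = _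
    have : ((List.range rest.length).map ((fun i =>
        (String.ofList ((a :: rest).getD i []),
         String.ofList (PySem.Chars.join ['.'] (pre ++ ((a :: rest).take i ++ (a :: rest).drop (i + 1)))), v))
          ∘ Nat.succ))
        = (List.range rest.length).map (fun i =>
        (String.ofList (rest.getD i []),
         String.ofList (PySem.Chars.join ['.'] ((pre ++ [a]) ++ (rest.take i ++ rest.drop (i + 1)))), v)) := by
      apply List.map_congr_left
      intro i _
      simp [Function.comp, List.take_succ_cons, List.drop_succ_cons,
        List.append_assoc]
    rw [this, ih (pre ++ [a])]
    rfl

theorem process_value_eq_spec (x : String × Int) :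
    process_value x = pvSpec x.2 [] (PySem.Chars.splitOn x.1.toList ['.']) := by
  show (PySem.List.pyRange 0 ((PySem.Chars.splitOn x.1.toList ['.']).length : Int) 1).foldl _ [] = _
  generalize hA : PySem.Chars.splitOn x.1.toList ['.'] = apps
  rw [PySem.List.foldl_append_singleton_eq_map, List.nil_append,
    PySem.List.pyRange_zero_natCast, List.map_map]
  rw [← pvMap_range_eq_spec x.2 apps []]
  apply List.map_congr_left
  intro i hi
  have hi' : i < apps.length := List.mem_range.mp hi
  simp only [Function.comp, List.nil_append]
  congr 1
  · -- apps[i] via pyGet?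
    rw [PySem.List.pyGet?_natCast]
    rw [List.getD_eq_getElem?_getD]
  · congr 2
    -- slices to take/drop
    rw [PySem.List.slice_zero_start, PySem.List.slice_to_natCast]
    have : ((i : Int) + 1) = ((i + 1 : Nat) : Int) := by push_cast; ring
    rw [this, PySem.List.slice_from_natCast]

-- ===== VERDICT (by name: the statement is the Claim_ definition above) =====
theorem process_value_spec : Claim_equal_process_value := by
  intro x _
  show process_value x = process_value_alt x
  rw [process_value_eq_spec]
  show _ = pvLoopB x.2 _ (pvSuff _) [] true
  have h : ([] : List Char) = PySem.Chars.join ['.'] ([] : List (List Char)) := rfl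
  rw [h]
  have h2 : (true : Bool) = ([] : List (List Char)).isEmpty := rfl
  rw [h2, pvLoopB_eq_spec]
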